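-- pv_equiv track=rewrite | github.com/alagakin/voz | app/src/api/router.py | route_matches
-- ===== SOURCE A (Python) =====
-- def route_matches(route, station_from, station_to) -> bool:
--     station_from_key = -1
--     station_to_key = -1
--     for key, station in enumerate(route['stations']):
--         if station['name'] == station_from:
--             station_from_key = key
--         if station['name'] == station_to:
--             station_to_key = key
--
--     if station_from_key == -1 or station_to_key == -1:
--         return False
--
--     if station_from_key >= station_to_key:
--         return False
--
--     return True
-- ===== SOURCE B (Python) =====
-- def route_matches(route, station_from, station_to) -> bool:
--     # Reverse the name list and compare FIRST occurrences: the last occurrence of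
--     # station_from precedes the last of station_to iff, reading the route backwards,
--     # station_to is met strictly before station_from.
--     names = [station['name'] for station in route['stations']]
--     names.reverse()
--     if station_from not in names or station_to not in names:
--         return False
--     return names.index(station_to) < names.index(station_from)
-- ===== Notes on version B (the rewrite author's own statement) =====
-- stated objective: alternative
-- what changed: Instead of tracking last-match indices during a forward scan, B extracts the name list, reverses it, and compares first occurrences in the reversed list (last-of-from before last-of-to iff first-of-to before first-of-from backwards).
import Mathlib
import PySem

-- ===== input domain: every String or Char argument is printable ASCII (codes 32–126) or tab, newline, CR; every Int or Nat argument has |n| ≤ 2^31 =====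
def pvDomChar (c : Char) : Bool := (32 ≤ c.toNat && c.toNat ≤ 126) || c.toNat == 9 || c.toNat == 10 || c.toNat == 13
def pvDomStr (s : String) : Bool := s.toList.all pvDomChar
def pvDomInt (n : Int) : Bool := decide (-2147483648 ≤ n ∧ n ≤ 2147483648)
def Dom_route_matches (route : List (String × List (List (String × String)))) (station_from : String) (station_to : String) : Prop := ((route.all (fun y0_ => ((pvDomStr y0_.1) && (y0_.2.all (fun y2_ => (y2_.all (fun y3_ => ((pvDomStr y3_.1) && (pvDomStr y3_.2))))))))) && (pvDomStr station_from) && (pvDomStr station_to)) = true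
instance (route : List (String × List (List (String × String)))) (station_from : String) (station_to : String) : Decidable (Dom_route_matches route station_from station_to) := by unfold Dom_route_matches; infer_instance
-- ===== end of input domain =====

-- B replaces A's forward scan with two last-match trackers by: build the name list, reverse it,
-- and compare FIRST occurrences in the reversed list (objective: alternative, same O(n) cost).


-- first-match association-list lookup (Python dict access d[k])
def pvGetKey {α : Type} (l : List (String × α)) (k : String) : Option α :=
  match l with
  | [] => none
  | (k', v) :: rest => if k' == k then some v else pvGetKey rest k

-- ===== PORT A =====
def route_matches (route : List (String × List (List (String × String)))) (station_from : String) (station_to : String) : Bool :=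
  let stations := (pvGetKey route "stations").getD []
  let p := (PySem.List.enumerate stations).foldl
    (fun (p : Int × Int) ks =>
      let name := (pvGetKey ks.2 "name").getD ""
      ((if name == station_from then ks.1 else p.1),
       (if name == station_to then ks.1 else p.2)))
    (-1, -1)
  if p.1 == -1 || p.2 == -1 then false
  else if p.1 ≥ p.2 then false
  else true

-- ===== PORT B =====
def route_matches_alt (route : List (String × List (List (String × String)))) (station_from : String) (station_to : String) : Bool :=
  let stations := (pvGetKey route "stations").getD []
  let names := (stations.map (fun st => (pvGetKey st "name").getD "")).reverse
  if !(names.contains station_from) || !(names.contains station_to) then false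
  else decide ((PySem.List.index? names station_to).getD 0 < (PySem.List.index? names station_from).getD 0)

-- ===== PRECONDITION & SPEC =====
-- Pre_ excludes exactly the inputs where the Python raises KeyError: a route without a
-- "stations" key, or a station without a "name" key (both A and B raise there).
def Pre_route_matches (route : List (String × List (List (String × String)))) (station_from : String) (station_to : String) : Prop :=
  "stations" ∈ route.map Prod.fst ∧
  ∀ st ∈ (((route.find? (fun p => p.1 == "stations")).map Prod.snd).getD []), "name" ∈ st.map Prod.fst
instance (route : List (String × List (List (String × String)))) (station_from : String) (station_to : String) : Decidable (Pre_route_matches route station_from station_to) := by unfold Pre_route_matches; infer_instance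

def pvWitness_route_matches : (List (String × List (List (String × String)))) × String × String :=
  ([("stations", [[("name", "a")], [("name", "b")]])], "a", "b")

def Spec_route_matches (route : List (String × List (List (String × String)))) (station_from : String) (station_to : String) (out : Bool) : Prop := out = route_matches_alt route station_from station_to
instance (route : List (String × List (List (String × String)))) (station_from : String) (station_to : String) (out : Bool) : Decidable (Spec_route_matches route station_from station_to out) := by unfold Spec_route_matches; infer_instance

-- ===== CLAIM =====
def Claim_equal_route_matches : Prop := ∀ (route : List (String × List (List (String × String)))) (station_from : String) (station_to : String), Dom_route_matches route station_from station_to → Pre_route_matches route station_from station_to → Spec_route_matches route station_from station_to (route_matches route station_from station_to)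

-- ===== LEMMAS AND PROOFS =====

-- A's pair-state fold splits into two independent scalar folds.
theorem foldl_pair {γ : Type} (f g : γ → Int → Int) :
    ∀ (l : List γ) (a b : Int),
    l.foldl (fun (p : Int × Int) c => (f c p.1, g c p.2)) (a, b)
      = (l.foldl (fun x c => f c x) a, l.foldl (fun x c => g c x) b) := by
  intro l
  induction l with
  | nil => intro a b; rfl
  | cons c rest ih => intro a b; simpa using ih (f c a) (g c b)

-- A's last-match tracker over enumerate equals "length - 1 - first index in the reversed name list".
theorem tracker_eq_rev_index (x : String) :
    ∀ (L : List (List (String × String))) (s acc : Int),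
    (PySem.List.enumerate L s).foldl
        (fun (a : Int) p => if (pvGetKey p.2 "name").getD "" == x then p.1 else a) acc
      = ((PySem.List.index? ((L.map (fun st => (pvGetKey st "name").getD "")).reverse) x).map
          (fun r => s + ((L.length - 1 - r : Nat) : Int))).getD acc := by
  intro L
  induction L with
  | nil =>
    intro s acc
    simp [PySem.List.enumerate, PySem.List.index?_eq_idxOf?]
  | cons c rest ih =>
    intro s acc
    rw [PySem.List.enumerate_cons, List.foldl_cons, ih (s + 1)]
    simp only [List.map_cons, List.reverse_cons, List.length_cons]
    by_cases hmem : x ∈ rest.map (fun st => (pvGetKey st "name").getD "")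
    · have hmemr : x ∈ (rest.map (fun st => (pvGetKey st "name").getD "")).reverse := by
        simpa using hmem
      rw [PySem.List.index?_append_of_mem [(pvGetKey c "name").getD ""]
        (l := (rest.map (fun st => (pvGetKey st "name").getD "")).reverse) hmemr]
      rcases hr : PySem.List.index? ((rest.map (fun st => (pvGetKey st "name").getD "")).reverse) x
        with _ | r
      · exact absurd ((PySem.List.index?_eq_none_iff _ _).mp hr) (by simpa using hmem)
      · obtain ⟨hk, -, -⟩ := PySem.List.getElem_of_index?_eq_some hr
        have hrlen : r < rest.length := by simpa using hk
        simp only [Option.map_some, Option.getD_some]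
        have : ((rest.length + 1 - 1 - r : Nat) : Int) = ((rest.length - 1 - r : Nat) : Int) + 1 := by
          omega
        rw [this]; ring
    · have hnone : PySem.List.index?
          ((rest.map (fun st => (pvGetKey st "name").getD "")).reverse) x = none := by
        rw [PySem.List.index?_eq_none_iff]; simpa using hmem
      rw [hnone]
      by_cases hc : (pvGetKey c "name").getD "" = x
      · rw [hc, PySem.List.index?_append_singleton_self _ _ (by simpa using hmem)]
        have hlen : (rest.map (fun st => (pvGetKey st "name").getD "")).reverse.length
            = rest.length := by simp
        rw [hlen]
        have : (rest.length + 1 - 1 - rest.length : Nat) = 0 := by omega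
        simp
      · have : PySem.List.index?
            ((rest.map (fun st => (pvGetKey st "name").getD "")).reverse
              ++ [(pvGetKey c "name").getD ""]) x = none := by
          rw [PySem.List.index?_eq_none_iff]
          simp [hmem, Ne.symm hc]
        rw [this]
        simp [hc]

-- ===== VERDICT =====
theorem route_matches_spec : Claim_equal_route_matches := by
  intro route station_from station_to _ _
  show route_matches route station_from station_to = route_matches_alt route station_from station_to
  unfold route_matches route_matches_alt
  set stations := (pvGetKey route "stations").getD [] with hst
  have hp := foldl_pair
    (fun (ks : Int × List (String × String)) x =>
      if (pvGetKey ks.2 "name").getD "" == station_from then ks.1 else x)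
    (fun (ks : Int × List (String × String)) x =>
      if (pvGetKey ks.2 "name").getD "" == station_to then ks.1 else x)
    (PySem.List.enumerate stations) (-1) (-1)
  simp only [hp, tracker_eq_rev_index station_from stations 0 (-1),
    tracker_eq_rev_index station_to stations 0 (-1)]
  have hcf : (((stations.map (fun st => (pvGetKey st "name").getD "")).reverse).contains station_from)
      = (PySem.List.index? ((stations.map (fun st => (pvGetKey st "name").getD "")).reverse) station_from).isSome := by
    rw [Bool.eq_iff_iff, PySem.List.index?_isSome_iff]; simp
  have hct : (((stations.map (fun st => (pvGetKey st "name").getD "")).reverse).contains station_to)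
      = (PySem.List.index? ((stations.map (fun st => (pvGetKey st "name").getD "")).reverse) station_to).isSome := by
    rw [Bool.eq_iff_iff, PySem.List.index?_isSome_iff]; simp
  rcases hf : PySem.List.index? ((stations.map (fun st => (pvGetKey st "name").getD "")).reverse) station_from with _ | rf <;>
    rcases ht : PySem.List.index? ((stations.map (fun st => (pvGetKey st "name").getD "")).reverse) station_to with _ | rt <;>
    simp only [hf, ht, hcf, hct, Option.isSome_some, Option.isSome_none,
      Option.map_some, Option.map_none, Option.getD_some, Option.getD_none] <;>
    simp
  -- both found: positions satisfy the reversed-order equivalence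
  obtain ⟨hkf, -, -⟩ := PySem.List.getElem_of_index?_eq_some hf
  obtain ⟨hkt, -, -⟩ := PySem.List.getElem_of_index?_eq_some ht
  simp only [List.length_reverse, List.length_map] at hkf hkt
  rw [Bool.eq_iff_iff]
  simp
  omega
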